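-- pv_equiv track=rewrite | github.com/abrahamshimekt/Competitive-Programming-Problem-Solutions | diagonal_traverse/diagonal_traverse.py | below_diagonal
-- ===== SOURCE A (Python) =====
-- def below_diagonal(m,n,mat):
--
--     below_diagonal = []
--     for row in range(1,m):
--
--         below_row = row
--         left_column = n-1
--         diagonal = []
--
--         while below_row < m and left_column >-1:
--             diagonal.append(mat[below_row][left_column])
--             below_row +=1
--             left_column -=1
--
--         # if the last column was traversed from bottom left to right upward
--         # then the diagonal elements should be reversed
--
--         if (n + row)% 2 != 0:
--             diagonal = diagonal[::-1]
--
--         below_diagonal += diagonal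
--
--     return below_diagonal
-- ===== SOURCE B (Python) =====
-- def below_diagonal(m, n, mat):
--     # bucket the below-diagonal cells by anti-diagonal sum in one row-major sweep,
--     # then emit diagonals in order, reversing the even-sum ones
--     buckets = {}
--     for i in range(1, m):
--         for j in range(max(n - i, 0), n):
--             buckets.setdefault(i + j, []).append(mat[i][j])
--     out = []
--     for s in range(n, m + n - 1):
--         d = buckets.get(s, [])
--         out += d[::-1] if s % 2 == 0 else d
--     return out
-- ===== Notes on version B (the rewrite author's own statement) =====
-- stated objective: alternative
-- what changed: Replaces the per-row diagonal walk (a twin-counter while loop per starting row) with a dict of buckets keyed by anti-diagonal sum filled in one row-major sweep, followed by an ordered emit pass that reverses even-sum diagonals.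
import Mathlib
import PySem

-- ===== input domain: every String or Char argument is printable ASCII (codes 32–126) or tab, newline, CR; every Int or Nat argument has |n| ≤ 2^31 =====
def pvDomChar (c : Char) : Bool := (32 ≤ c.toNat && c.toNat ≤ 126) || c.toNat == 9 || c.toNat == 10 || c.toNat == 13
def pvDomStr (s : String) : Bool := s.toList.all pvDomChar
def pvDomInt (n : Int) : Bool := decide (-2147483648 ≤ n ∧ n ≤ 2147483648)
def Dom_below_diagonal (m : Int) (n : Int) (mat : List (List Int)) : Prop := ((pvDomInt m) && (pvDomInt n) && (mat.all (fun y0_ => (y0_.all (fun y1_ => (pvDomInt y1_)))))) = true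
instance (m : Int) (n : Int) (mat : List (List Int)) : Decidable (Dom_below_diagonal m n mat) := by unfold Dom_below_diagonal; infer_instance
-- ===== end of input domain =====

-- B re-implements the per-row diagonal walk as a bucket-by-anti-diagonal dict built in one
-- row-major sweep followed by an ordered emit pass (objective: alternative decomposition).

-- mat[i][j] (both Pythons only evaluate it where it succeeds; Pre_ excludes the raising inputs)
def cellD (mat : List (List Int)) (i j : Int) : Int :=
  (PySem.List.pyGet? ((PySem.List.pyGet? mat i).getD []) j).getD 0

-- ===== PORT A =====
-- the inner 'while below_row < m and left_column > -1' loop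
def whileA (m : Int) (mat : List (List Int)) (br lc : Int) (diag : List Int) : List Int :=
  if _h : br < m ∧ -1 < lc then
    whileA m mat (br + 1) (lc - 1) (diag ++ [cellD mat br lc])
  else diag
termination_by (m - br).toNat
decreasing_by omega

def below_diagonal (m : Int) (n : Int) (mat : List (List Int)) : List Int :=
  (PySem.List.pyRange 1 m 1).foldl (fun acc row =>
    let diagonal := whileA m mat row (n - 1) []
    let diagonal := if PySem.Int.mod (n + row) 2 ≠ 0
                    then (PySem.List.slice? diagonal none none (-1)).getD []   -- diagonal[::-1]
                    else diagonal
    acc ++ diagonal) []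

-- ===== PORT B =====
def below_diagonal_alt (m : Int) (n : Int) (mat : List (List Int)) : List Int :=
  let buckets : PySem.Dict Int (List Int) :=
    (PySem.List.pyRange 1 m 1).foldl (fun b i =>
      (PySem.List.pyRange (max (n - i) 0) n 1).foldl (fun b j =>
        b.modify (i + j) [] (· ++ [cellD mat i j])) b)   -- buckets.setdefault(i+j, []).append(…)
      PySem.Dict.empty
  (PySem.List.pyRange n (m + n - 1) 1).foldl (fun out s =>
    let d := buckets.getD s []
    out ++ (if PySem.Int.mod s 2 = 0
            then (PySem.List.slice? d none none (-1)).getD []    -- d[::-1]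
            else d)) []

-- ===== PRECONDITION & SPEC =====
-- exactly the inputs on which Python A returns (no IndexError): when the loops run at all
-- (m ≥ 2, n ≥ 1), rows 1..m-1 must exist and each accessed row must have ≥ n columns
def Pre_below_diagonal (m : Int) (n : Int) (mat : List (List Int)) : Prop :=
  (2 ≤ m ∧ 1 ≤ n) → (m ≤ mat.length ∧ ∀ r ∈ (mat.take m.toNat).drop 1, (n : Int) ≤ r.length)
instance (m : Int) (n : Int) (mat : List (List Int)) : Decidable (Pre_below_diagonal m n mat) := by
  unfold Pre_below_diagonal; infer_instance

def pvWitness_below_diagonal : Int × Int × List (List Int) := (2, 2, [[1, 2], [3, 4]])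

def Spec_below_diagonal (m : Int) (n : Int) (mat : List (List Int)) (out : List Int) : Prop := out = below_diagonal_alt m n mat
instance (m : Int) (n : Int) (mat : List (List Int)) (out : List Int) : Decidable (Spec_below_diagonal m n mat out) := by unfold Spec_below_diagonal; infer_instance

-- ===== CLAIM (what is proved, stated in full; the proofs are below) =====
def Claim_equal_below_diagonal : Prop := ∀ (m : Int) (n : Int) (mat : List (List Int)), Dom_below_diagonal m n mat → Pre_below_diagonal m n mat → Spec_below_diagonal m n mat (below_diagonal m n mat)

-- ===== LEMMAS AND PROOFS =====

-- the diagonal of given length starting at (br, lc), walking down-left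
def diagN (mat : List (List Int)) (br lc : Int) : Nat → List Int
  | 0 => []
  | t + 1 => cellD mat br lc :: diagN mat (br + 1) (lc - 1) t

-- the diagonal starting at (row, n-1), walking down-left
def diagL (m n : Int) (mat : List (List Int)) (row : Int) : List Int :=
  diagN mat row (n - 1) (min (m - row) n).toNat

theorem whileA_eq (m : Int) (mat : List (List Int)) :
    ∀ (br lc : Int) (diag : List Int),
      whileA m mat br lc diag = diag ++ diagN mat br lc (min (m - br) (lc + 1)).toNat := by
  intro br lc diag
  fun_induction whileA m mat br lc diag with
  | case1 br lc diag h ih =>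
    rw [ih]
    have ht : (min (m - br) (lc + 1)).toNat = (min (m - (br + 1)) ((lc - 1) + 1)).toNat + 1 := by
      omega
    rw [ht]
    simp [diagN]
  | case2 br lc diag h =>
    have : (min (m - br) (lc + 1)).toNat = 0 := by omega
    simp [this, diagN]

theorem A_eq (m n : Int) (mat : List (List Int)) :
    below_diagonal m n mat
      = (PySem.List.pyRange 1 m 1).flatMap (fun row =>
          if PySem.Int.mod (n + row) 2 ≠ 0 then (diagL m n mat row).reverse
          else diagL m n mat row) := by
  unfold below_diagonal
  simp only [PySem.List.slice?_none_none_neg_one, Option.getD_some]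
  rw [PySem.List.foldl_append_eq_flatMap]
  simp only [List.nil_append]
  apply List.flatMap_congr
  intro row _
  have : whileA m mat row (n - 1) [] = diagL m n mat row := by
    rw [whileA_eq]
    unfold diagL
    have h1 : n - 1 + 1 = n := by ring
    rw [h1, List.nil_append]
  rw [this]

-- ----- B side -----

def upd (n : Int) (mat : List (List Int)) (i : Int) : List (Int × Int) :=
  (PySem.List.pyRange (max (n - i) 0) n 1).map (fun j => (i + j, cellD mat i j))

theorem foldl_flatMap' {α β γ : Type} (l : List α) (g : α → List β) (f : γ → β → γ) (init : γ) :
    (l.flatMap g).foldl f init = l.foldl (fun acc x => (g x).foldl f acc) init := by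
  induction l generalizing init with
  | nil => rfl
  | cons a t ih => simp [List.foldl_append, ih]

theorem filter_eq_of_pyRange (c s : Int) : ∀ (a b : Int),
    (PySem.List.pyRange a b 1).filter (fun j => c + j == s)
      = if a ≤ s - c ∧ s - c < b then [s - c] else [] := by
  intro a b
  by_cases hab : b ≤ a
  · rw [PySem.List.pyRange_one_eq_nil hab,
       if_neg (show ¬(a ≤ s - c ∧ s - c < b) by omega)]
    rfl
  · have hlt : a < b := by omega
    rw [PySem.List.pyRange_one_cons hlt, List.filter_cons]
    have ih := filter_eq_of_pyRange c s (a + 1) b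
    by_cases hca : c + a = s
    · rw [if_pos (by simp [hca]), ih,
        if_neg (show ¬(a + 1 ≤ s - c ∧ s - c < b) by omega),
        if_pos (show a ≤ s - c ∧ s - c < b by omega)]
      have : a = s - c := by omega
      rw [this]
    · rw [if_neg (by simp; omega), ih]
      by_cases h2 : a + 1 ≤ s - c ∧ s - c < b
      · rw [if_pos h2, if_pos (show a ≤ s - c ∧ s - c < b by omega)]
      · rw [if_neg h2, if_neg (show ¬(a ≤ s - c ∧ s - c < b) by omega)]
termination_by a b => (b - a).toNat
decreasing_by omega

theorem flatMap_ite_singleton {α β : Type} (l : List α) (p : α → Prop) [DecidablePred p] (f : α → β) :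
    (l.flatMap (fun x => if p x then [f x] else []))
      = (l.filter (fun x => decide (p x))).map f := by
  induction l with
  | nil => rfl
  | cons a t ih =>
    simp only [List.flatMap_cons, List.filter_cons, ih]
    by_cases h : p a
    · simp [h]
    · simp [h]

theorem filter_interval (lo hi : Int) : ∀ (a b : Int),
    (PySem.List.pyRange a b 1).filter (fun i => decide (lo ≤ i ∧ i ≤ hi))
      = PySem.List.pyRange (max a lo) (min b (hi + 1)) 1 := by
  intro a b
  by_cases hab : b ≤ a
  · rw [PySem.List.pyRange_one_eq_nil hab, PySem.List.pyRange_one_eq_nil (by omega)]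
    rfl
  · have hlt : a < b := by omega
    rw [PySem.List.pyRange_one_cons hlt, List.filter_cons]
    have ih := filter_interval lo hi (a + 1) b
    by_cases h : lo ≤ a ∧ a ≤ hi
    · rw [if_pos (by simpa using h), ih,
        PySem.List.pyRange_one_cons (show max a lo < min b (hi + 1) by omega)]
      have h1 : max a lo = a := by omega
      have h2 : max (a + 1) lo = a + 1 := by omega
      rw [h1, h2]
    · rw [if_neg (by simpa using h), ih]
      by_cases hlo : lo ≤ a
      · rw [PySem.List.pyRange_one_eq_nil (by omega), PySem.List.pyRange_one_eq_nil (by omega)]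
      · have : max a lo = max (a + 1) lo := by omega
        rw [this]
termination_by a b => (b - a).toNat
decreasing_by omega

theorem filter_upd (n s : Int) (mat : List (List Int)) (hs : n ≤ s) (i : Int) :
    ((upd n mat i).filter (fun p => p.1 == s)).map Prod.snd
      = if s - n + 1 ≤ i ∧ i ≤ s then [cellD mat i (s - i)] else [] := by
  unfold upd
  rw [List.filter_map]
  simp only [Function.comp_def]
  rw [filter_eq_of_pyRange i s (max (n - i) 0) n]
  by_cases h : max (n - i) 0 ≤ s - i ∧ s - i < n
  · rw [if_pos h, if_pos (by omega)]
    simp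
  · rw [if_neg h, if_neg (by omega)]
    simp

-- buckets.getD s, for n ≤ s, as a closed form
theorem bucket_eq (m n : Int) (mat : List (List Int)) (s : Int) (hs : n ≤ s) :
    (((PySem.List.pyRange 1 m 1).foldl (fun b i =>
        (PySem.List.pyRange (max (n - i) 0) n 1).foldl (fun b j =>
          b.modify (i + j) [] (· ++ [cellD mat i j])) b) PySem.Dict.empty).getD s [])
      = (PySem.List.pyRange (max 1 (s - n + 1)) (min m (s + 1)) 1).map
          (fun i => cellD mat i (s - i)) := by
  have hfold : (PySem.List.pyRange 1 m 1).foldl (fun b i =>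
        (PySem.List.pyRange (max (n - i) 0) n 1).foldl (fun b j =>
          b.modify (i + j) [] (· ++ [cellD mat i j])) b) PySem.Dict.empty
      = ((PySem.List.pyRange 1 m 1).flatMap (upd n mat)).foldl
          (fun d p => d.modify p.1 [] (· ++ [p.2])) PySem.Dict.empty := by
    rw [foldl_flatMap']
    congr 1
    funext b i
    unfold upd
    rw [List.foldl_map]
  rw [hfold, PySem.Dict.getD_foldl_modify_append]
  have hempty : (PySem.Dict.empty : PySem.Dict Int (List Int)).getD s [] = [] := rfl
  rw [hempty, List.nil_append]
  rw [List.filter_flatMap]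
  rw [List.map_flatMap]
  have : ∀ i ∈ PySem.List.pyRange 1 m 1,
      ((upd n mat i).filter (fun p => p.1 == s)).map Prod.snd
        = if s - n + 1 ≤ i ∧ i ≤ s then [cellD mat i (s - i)] else [] := by
    intro i _
    exact filter_upd n s mat hs i
  rw [List.flatMap_congr this]
  rw [flatMap_ite_singleton (PySem.List.pyRange 1 m 1)
        (fun i => s - n + 1 ≤ i ∧ i ≤ s) (fun i => cellD mat i (s - i))]
  rw [filter_interval (s - n + 1) s 1 m]

theorem map_pyRange_diagN (mat : List (List Int)) :
    ∀ (t : Nat) (br s : Int),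
      (PySem.List.pyRange br (br + t) 1).map (fun i => cellD mat i (s - i))
        = diagN mat br (s - br) t := by
  intro t
  induction t with
  | zero =>
    intro br s
    rw [PySem.List.pyRange_one_eq_nil (by omega)]
    rfl
  | succ t ih =>
    intro br s
    rw [PySem.List.pyRange_one_cons (by omega)]
    have hr : br + ((t : Int) + 1) = (br + 1) + t := by ring
    push_cast
    rw [hr]
    simp only [List.map_cons]
    rw [ih (br + 1) s]
    have : s - (br + 1) = s - br - 1 := by ring
    rw [this]
    rfl

theorem bucket_diag (m n : Int) (mat : List (List Int)) (row : Int) (hrow : 1 ≤ row) :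
    (PySem.List.pyRange (max 1 (n - 1 + row - n + 1)) (min m (n - 1 + row + 1)) 1).map
        (fun i => cellD mat i (n - 1 + row - i))
      = diagL m n mat row := by
  have h1 : max 1 (n - 1 + row - n + 1) = row := by omega
  rw [h1]
  unfold diagL
  by_cases hpos : 0 < min (m - row) n
  · have hT : min m (n - 1 + row + 1) = row + ((min (m - row) n).toNat : Int) := by omega
    rw [hT, map_pyRange_diagN mat _ row (n - 1 + row)]
    have : n - 1 + row - row = n - 1 := by ring
    rw [this]
  · have h0 : (min (m - row) n).toNat = 0 := by omega
    rw [h0, PySem.List.pyRange_one_eq_nil (by omega)]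
    rfl

theorem reindex (m n : Int) :
    PySem.List.pyRange n (m + n - 1) 1
      = (PySem.List.pyRange 1 m 1).map (fun r => n - 1 + r) := by
  rw [PySem.List.pyRange_one, PySem.List.pyRange_one, List.map_map]
  have : (m + n - 1 - n).toNat = (m - 1).toNat := by omega
  rw [this]
  apply List.map_congr_left
  intro k _
  simp only [Function.comp_apply]
  ring

theorem parity (n row : Int) :
    (PySem.Int.mod (n - 1 + row) 2 = 0) ↔ (PySem.Int.mod (n + row) 2 ≠ 0) := by
  rw [PySem.Int.mod_eq_emod_of_pos (show (0:Int) < 2 by norm_num),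
      PySem.Int.mod_eq_emod_of_pos (show (0:Int) < 2 by norm_num)]
  omega

theorem B_eq (m n : Int) (mat : List (List Int)) :
    below_diagonal_alt m n mat
      = (PySem.List.pyRange 1 m 1).flatMap (fun row =>
          if PySem.Int.mod (n + row) 2 ≠ 0 then (diagL m n mat row).reverse
          else diagL m n mat row) := by
  unfold below_diagonal_alt
  rw [PySem.List.foldl_append_eq_flatMap]
  rw [List.nil_append, reindex m n, List.flatMap_map]
  apply List.flatMap_congr
  intro row hrow
  have hr1 : 1 ≤ row := (PySem.List.mem_pyRange_one.mp hrow).1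
  simp only [PySem.List.slice?_none_none_neg_one, Option.getD_some]
  rw [bucket_eq m n mat (n - 1 + row) (by omega), bucket_diag m n mat row hr1]
  by_cases hpar : PySem.Int.mod (n + row) 2 ≠ 0
  · rw [if_pos hpar, if_pos ((parity n row).mpr hpar)]
  · rw [if_neg hpar, if_neg (fun h => hpar ((parity n row).mp h))]

-- ===== VERDICT (by name: the statement is the Claim_ definition above) =====
theorem below_diagonal_spec : Claim_equal_below_diagonal := by
  intro m n mat _ _
  unfold Spec_below_diagonal
  rw [A_eq, B_eq]
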